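-- pv_equiv track=rewrite | github.com/guptaShantanu/Python-Programs | beyBlade.py | solve
-- ===== SOURCE A (Python) =====
-- def solve(myTeam,opponent,n):
--     start=0
--     winCount=0
--     myTeam.sort(reverse=True)
--     opponent.sort(reverse=True)
--     for i in range(n):
--         for j in range(start,n):
--             if myTeam[i]>opponent[j]:
--                 winCount+=1
--                 start=j+1
--                 break
--             if j==n-1:
--                 return winCount
--     return winCount
-- ===== SOURCE B (Python) =====
-- def solve(myTeam, opponent, n):
--     # The greedy maximum number of wins equals the largest k such that, after
--     # sorting both teams strongest-first, my k strongest beat the opponent's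
--     # k weakest rank-for-rank.  That feasibility is monotone in k (shrinking k
--     # pairs each of my players against a weaker opponent), so binary-search k.
--     a = sorted(myTeam, reverse=True)
--     b = sorted(opponent, reverse=True)
--
--     def wins_all(k):
--         return all(a[i] > b[n - k + i] for i in range(k))
--
--     lo, hi = 0, n
--     while lo < hi:
--         mid = (lo + hi + 1) // 2
--         if wins_all(mid):
--             lo = mid
--         else:
--             hi = mid - 1
--     return lo
-- ===== Notes on version B (the rewrite author's own statement) =====
-- stated objective: alternative
-- what changed: A simulates the greedy matching itself (nested scan with a persistent start pointer, counting individual wins one by one); B never matches pairs: it reformulates the answer as the largest k for which my top-k beats the opponent's bottom-k rank-for-rank after sorting, and binary-searches that k using the monotonicity of the feasibility check. Pre_ excludes n larger than either list's length, where A's indexing generally raises IndexError.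
-- outside the precondition, e.g. on solve([-1, -3], [0, -1, -1, 2], 3): A returns 0, B returns 0; on solve([9, 0], [1, 8, 8], 3): A returns 1, B returns 1
import Mathlib
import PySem

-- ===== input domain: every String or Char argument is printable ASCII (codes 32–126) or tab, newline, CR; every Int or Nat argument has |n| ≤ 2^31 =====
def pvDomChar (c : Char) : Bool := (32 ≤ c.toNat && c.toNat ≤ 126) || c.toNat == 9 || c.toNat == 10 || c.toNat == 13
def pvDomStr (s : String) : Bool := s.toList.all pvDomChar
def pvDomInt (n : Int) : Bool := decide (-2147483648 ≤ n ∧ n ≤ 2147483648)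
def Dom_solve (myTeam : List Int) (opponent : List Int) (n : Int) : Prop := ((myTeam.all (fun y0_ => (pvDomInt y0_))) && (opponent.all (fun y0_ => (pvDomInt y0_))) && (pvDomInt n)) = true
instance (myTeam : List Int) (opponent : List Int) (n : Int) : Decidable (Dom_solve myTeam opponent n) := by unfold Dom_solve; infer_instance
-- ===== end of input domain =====

-- B replaces A's greedy matching simulation by a binary search for the largest k
-- whose top-k-vs-bottom-k rank-for-rank pairing wins everywhere (objective: alternative).
-- Note: Python A sorts both argument lists in place; the equivalence proved here is
-- about the RETURN value only (B does not mutate its arguments).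

-- ===== PORT A =====
inductive AInner where
  | ret : AInner
  | win : Int → AInner
  | cont : AInner
deriving DecidableEq, Repr

-- inner 'for j in range(start, n)' loop: .win s = break with new start s,
-- .ret = the early 'return winCount', .cont = range exhausted without a break/return
def innerA (op : List Int) (n : Int) (xi : Int) (j : Int) : Nat → AInner
  | 0 => .cont
  | f + 1 =>
    if ((PySem.List.pyGet? op j).getD 0) < xi then .win (j + 1)
    else if j = n - 1 then .ret
    else innerA op n xi (j + 1) f

-- outer 'for i in range(n)' loop with state (start, winCount)
def outerA (mt op : List Int) (n : Int) (i start wc : Int) : Nat → Int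
  | 0 => wc
  | f + 1 =>
    match innerA op n ((PySem.List.pyGet? mt i).getD 0) start ((n - start).toNat) with
    | .ret => wc
    | .cont => outerA mt op n (i + 1) start wc f
    | .win s => outerA mt op n (i + 1) s (wc + 1) f

def solve (myTeam : List Int) (opponent : List Int) (n : Int) : Int :=
  outerA (PySem.List.sorted myTeam (fun x => x) true)
         (PySem.List.sorted opponent (fun x => x) true) n 0 0 0 n.toNat

-- ===== PORT B =====
-- 'all(a[i] > b[n - k + i] for i in range(k))'
def okB (a b : List Int) (n k : Int) : Bool :=
  (PySem.List.pyRange 0 k 1).all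
    (fun i => decide (((PySem.List.pyGet? b (n - k + i)).getD 0) < ((PySem.List.pyGet? a i).getD 0)))

-- 'while lo < hi: mid = (lo + hi + 1) // 2; if wins_all(mid): lo = mid else: hi = mid - 1'
def bsB (a b : List Int) (n : Int) (lo hi : Int) : Nat → Int
  | 0 => lo
  | f + 1 =>
    if lo < hi then
      let mid := PySem.Int.floordiv (lo + hi + 1) 2
      if okB a b n mid then bsB a b n mid hi f else bsB a b n lo (mid - 1) f
    else lo

def solve_alt (myTeam : List Int) (opponent : List Int) (n : Int) : Int :=
  bsB (PySem.List.sorted myTeam (fun x => x) true)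
      (PySem.List.sorted opponent (fun x => x) true) n 0 n n.toNat

-- ===== PRECONDITION & SPEC =====
-- Pre_ excludes n larger than either list's length: there A's indexing generally
-- raises IndexError (any return without raising is an accident of which matches
-- happen to fire before the out-of-range access).
def Pre_solve (myTeam : List Int) (opponent : List Int) (n : Int) : Prop :=
  n ≤ (myTeam.length : Int) ∧ n ≤ (opponent.length : Int)
instance (myTeam : List Int) (opponent : List Int) (n : Int) : Decidable (Pre_solve myTeam opponent n) := by unfold Pre_solve; infer_instance

def pvWitness_solve : List Int × List Int × Int := ([3, 1], [2, 0], 2)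

def Spec_solve (myTeam : List Int) (opponent : List Int) (n : Int) (out : Int) : Prop := out = solve_alt myTeam opponent n
instance (myTeam : List Int) (opponent : List Int) (n : Int) (out : Int) : Decidable (Spec_solve myTeam opponent n out) := by unfold Spec_solve; infer_instance

-- ===== CLAIM (what is proved, stated in full; the proofs are below) =====
def Claim_equal_solve : Prop := ∀ (myTeam : List Int) (opponent : List Int) (n : Int), Dom_solve myTeam opponent n → Pre_solve myTeam opponent n → Spec_solve myTeam opponent n (solve myTeam opponent n)

-- ===== LEMMAS AND PROOFS =====

-- weakly descending
def SD (l : List Int) : Prop := l.Pairwise (fun p q => q ≤ p)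

-- A's greedy matching, structurally, on descending lists
def Acount : List Int → List Int → Int
  | [], _ => 0
  | _ :: _, [] => 0
  | x :: xs, y :: ys => if y < x then 1 + Acount xs ys else Acount (x :: xs) ys
termination_by a b => a.length + b.length

-- first offset the current player wins at
def scanO (xi : Int) : List Int → Option Nat
  | [] => none
  | y :: ys => if y < xi then some 0 else (scanO xi ys).map (· + 1)

-- the pairing predicate behind B's check, and the downward search, in Nat form
def pOK (a b : List Int) (k : Nat) : Bool :=
  (List.range k).all (fun i => decide (b.getD (b.length - k + i) 0 < a.getD i 0))

def mkAux (a b : List Int) : Nat → Nat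
  | 0 => 0
  | k + 1 => if pOK a b (k + 1) then k + 1 else mkAux a b k

def mk (a b : List Int) : Nat := mkAux a b (min a.length b.length)

-- ---- basic facts ----

theorem Acount_nil_right (a : List Int) : Acount a [] = 0 := by
  cases a <;> simp [Acount]

theorem SD_getD_le (b : List Int) (hb : SD b) {i j : Nat} (hij : i ≤ j) (hj : j < b.length) :
    b.getD j 0 ≤ b.getD i 0 := by
  rcases Nat.eq_or_lt_of_le hij with rfl | h
  · exact le_refl _
  · have hi : i < b.length := lt_of_le_of_lt hij hj
    have := (List.pairwise_iff_getElem.mp hb) i j hi hj h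
    rw [List.getD_eq_getElem b 0 hi, List.getD_eq_getElem b 0 hj]
    exact this

theorem pOK_iff (a b : List Int) (k : Nat) :
    pOK a b k = true ↔ ∀ i < k, b.getD (b.length - k + i) 0 < a.getD i 0 := by
  simp [pOK, List.all_eq_true, List.mem_range]

-- ---- scanO and Acount ----

theorem scanO_lt (x : Int) (B : List Int) (t : Nat) (h : scanO x B = some t) : t < B.length := by
  induction B generalizing t with
  | nil => simp [scanO] at h
  | cons y ys ih =>
    by_cases hy : y < x
    · rw [scanO, if_pos hy] at h
      simp only [Option.some_inj] at h
      subst h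
      simp
    · rw [scanO, if_neg hy] at h
      simp only [Option.map_eq_some_iff] at h
      obtain ⟨t', ht', rfl⟩ := h
      have := ih t' ht'
      simp
      omega

theorem Acount_scanO_none (x : Int) (xs B : List Int) (h : scanO x B = none) :
    Acount (x :: xs) B = 0 := by
  induction B with
  | nil => simp [Acount]
  | cons y ys ih =>
    by_cases hy : y < x
    · rw [scanO, if_pos hy] at h
      exact absurd h (by simp)
    · rw [scanO, if_neg hy] at h
      simp only [Option.map_eq_none_iff] at h
      rw [Acount, if_neg hy]
      exact ih h

theorem Acount_scanO_some (x : Int) (xs B : List Int) (t : Nat) (h : scanO x B = some t) :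
    Acount (x :: xs) B = 1 + Acount xs (B.drop (t + 1)) := by
  induction B generalizing t with
  | nil => simp [scanO] at h
  | cons y ys ih =>
    by_cases hy : y < x
    · rw [scanO, if_pos hy] at h
      simp only [Option.some_inj] at h
      subst h
      simp [Acount, hy]
    · rw [scanO, if_neg hy] at h
      simp only [Option.map_eq_some_iff] at h
      obtain ⟨t', ht', rfl⟩ := h
      rw [Acount, if_neg hy, ih t' ht']
      simp

-- ---- A's fuel loops compute Acount ----

theorem innerA_spec (f : Nat) : ∀ (op : List Int) (n xi j : Int),
    0 ≤ j → j + (f : Int) = n → n ≤ (op.length : Int) →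
    innerA op n xi j f =
      (match scanO xi ((op.drop j.toNat).take f) with
       | some t => .win (j + (t : Int) + 1)
       | none => if f = 0 then .cont else .ret) := by
  induction f with
  | zero =>
    intro op n xi j h0 hjn hlen
    simp [innerA, scanO]
  | succ f ih =>
    intro op n xi j h0 hjn hlen
    have hjlt : j.toNat < op.length := by omega
    have hget : (PySem.List.pyGet? op j).getD 0 = op[j.toNat] := by
      rw [PySem.List.pyGet?_eq_some_getElem op h0 (by omega)]
      rfl
    rw [List.drop_eq_getElem_cons hjlt, List.take_succ_cons]
    rw [innerA, hget]
    by_cases hw : op[j.toNat] < xi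
    · rw [if_pos hw]
      simp [scanO, hw]
    · rw [if_neg hw]
      by_cases hlast : j = n - 1
      · have hf0 : f = 0 := by omega
        subst hf0
        rw [if_pos hlast]
        simp [scanO, hw]
      · have hf : f ≠ 0 := by omega
        rw [if_neg hlast, ih op n xi (j + 1) (by omega) (by push_cast at hjn ⊢; omega) hlen]
        have hj1 : (j + 1).toNat = j.toNat + 1 := by omega
        rw [hj1]
        cases hscan : scanO xi ((op.drop (j.toNat + 1)).take f) with
        | none => simp [scanO, hw, hscan, hf]
        | some t =>
          simp [scanO, hw, hscan]
          omega

theorem outerA_spec (f : Nat) : ∀ (mt op : List Int) (n i start wc : Int),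
    0 ≤ i → 0 ≤ start → i + (f : Int) = n →
    n ≤ (mt.length : Int) → n ≤ (op.length : Int) → start ≤ n →
    outerA mt op n i start wc f =
      wc + Acount ((mt.take n.toNat).drop i.toNat) ((op.take n.toNat).drop start.toNat) := by
  induction f with
  | zero =>
    intro mt op n i start wc h0i h0s hin hlm hlo hsn
    have hlen : (mt.take n.toNat).length ≤ i.toNat := by
      simp [List.length_take]
      omega
    rw [List.drop_eq_nil_of_le hlen]
    simp [outerA, Acount]
  | succ f ih =>
    intro mt op n i start wc h0i h0s hin hlm hlo hsn
    have hilt : i.toNat < (mt.take n.toNat).length := by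
      simp [List.length_take]
      omega
    have hgetx : (PySem.List.pyGet? mt i).getD 0 = mt[i.toNat] := by
      rw [PySem.List.pyGet?_eq_some_getElem mt h0i (by omega)]
      rfl
    have hBeq : (op.drop start.toNat).take ((n - start).toNat) = (op.take n.toNat).drop start.toNat := by
      rw [List.drop_take]
      congr 1
      omega
    rw [outerA, hgetx,
        innerA_spec ((n - start).toNat) op n (mt[i.toNat]) start h0s (by omega) hlo,
        hBeq, List.drop_eq_getElem_cons hilt, List.getElem_take]
    cases hscan : scanO (mt[i.toNat]) ((op.take n.toNat).drop start.toNat) with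
    | some t =>
      simp only []
      have htlt : t < ((op.take n.toNat).drop start.toNat).length :=
        scanO_lt _ _ _ hscan
      have htlt' : start + (t : Int) + 1 ≤ n := by
        simp [List.length_drop, List.length_take] at htlt
        omega
      rw [ih mt op n (i + 1) (start + (t : Int) + 1) (wc + 1) (by omega) (by omega)
            (by push_cast at hin ⊢; omega) hlm hlo htlt']
      rw [Acount_scanO_some _ _ _ _ hscan]
      have h1 : (i + 1).toNat = i.toNat + 1 := by omega
      have h2 : ((op.take n.toNat).drop start.toNat).drop (t + 1) =
          (op.take n.toNat).drop ((start + (t : Int) + 1).toNat) := by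
        rw [List.drop_drop]
        congr 1
        omega
      rw [h1, h2]
      ring
    | none =>
      simp only []
      by_cases hf0 : (n - start).toNat = 0
      · rw [if_pos hf0]
        simp only []
        have hnil : (op.take n.toNat).drop start.toNat = [] := by
          apply List.drop_eq_nil_of_le
          simp [List.length_take]
          omega
        rw [ih mt op n (i + 1) start wc (by omega) h0s (by push_cast at hin ⊢; omega) hlm hlo hsn]
        have h1 : (i + 1).toNat = i.toNat + 1 := by omega
        rw [h1, hnil, Acount_nil_right, Acount_nil_right]
      · rw [if_neg hf0]
        simp only []
        rw [Acount_scanO_none _ _ _ hscan]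
        ring

-- ---- the equations of the downward search ----

theorem pOK_shift_gt (x y : Int) (xs ys : List Int) (hxy : y < x) (hys : SD (y :: ys))
    (k : Nat) (hk : k ≤ ys.length) :
    pOK (x :: xs) (y :: ys) (k + 1) = pOK xs ys k := by
  rw [Bool.eq_iff_iff, pOK_iff, pOK_iff]
  have hylen : (y :: ys).length = ys.length + 1 := rfl
  constructor
  · intro h i hi
    have := h (i + 1) (by omega)
    rw [hylen] at this
    rw [show ys.length + 1 - (k + 1) + (i + 1) = (ys.length - k + i) + 1 by omega] at this
    simpa using this
  · intro h i hi
    rw [hylen]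
    match i with
    | 0 =>
      rw [show ys.length + 1 - (k + 1) + 0 = ys.length - k by omega]
      have h1 : (y :: ys).getD (ys.length - k) 0 ≤ (y :: ys).getD 0 0 :=
        SD_getD_le _ hys (Nat.zero_le _) (by simp only [List.length_cons]; omega)
      simp only [List.getD_cons_zero] at h1 ⊢
      exact lt_of_le_of_lt h1 hxy
    | i + 1 =>
      have := h i (by omega)
      rw [show ys.length + 1 - (k + 1) + (i + 1) = (ys.length - k + i) + 1 by omega]
      simpa using this

theorem pOK_cons_right (x y : Int) (xs ys : List Int) (k : Nat) (hk : k ≤ ys.length) :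
    pOK (x :: xs) (y :: ys) k = pOK (x :: xs) ys k := by
  rw [Bool.eq_iff_iff, pOK_iff, pOK_iff]
  have hylen : (y :: ys).length = ys.length + 1 := rfl
  constructor
  · intro h i hi
    have := h i hi
    rw [hylen, show ys.length + 1 - k + i = (ys.length - k + i) + 1 by omega] at this
    simpa using this
  · intro h i hi
    have := h i hi
    rw [hylen, show ys.length + 1 - k + i = (ys.length - k + i) + 1 by omega]
    simpa using this

theorem mkAux_cons_gt (x y : Int) (xs ys : List Int) (hxy : y < x) (hys : SD (y :: ys)) :
    ∀ j : Nat, j ≤ min xs.length ys.length →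
      mkAux (x :: xs) (y :: ys) (j + 1) = mkAux xs ys j + 1 := by
  intro j
  induction j with
  | zero =>
    intro _
    have hp : pOK (x :: xs) (y :: ys) (0 + 1) = true := by
      rw [pOK_iff]
      intro i hi
      have hi0 : i = 0 := by omega
      subst hi0
      have hlt : (y :: ys).length - 1 + 0 < (y :: ys).length := by
        simp
      have h1 : (y :: ys).getD ((y :: ys).length - 1 + 0) 0 ≤ (y :: ys).getD 0 0 :=
        SD_getD_le _ hys (Nat.zero_le _) hlt
      simp only [List.getD_cons_zero] at h1 ⊢
      exact lt_of_le_of_lt h1 hxy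
    simp [mkAux, hp]
  | succ j ih =>
    intro hj
    have hshift : pOK (x :: xs) (y :: ys) (j + 1 + 1) = pOK xs ys (j + 1) :=
      pOK_shift_gt x y xs ys hxy hys (j + 1) (by omega)
    by_cases hp : pOK xs ys (j + 1) = true
    · simp only [mkAux, hshift, hp]
      simp
    · simp only [mkAux, hshift, hp]
      simp only [Bool.false_eq_true, if_false]
      exact ih (by omega)

theorem mk_cons_gt (x y : Int) (xs ys : List Int) (hxy : y < x) (hys : SD (y :: ys)) :
    mk (x :: xs) (y :: ys) = mk xs ys + 1 := by
  unfold mk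
  rw [show min (x :: xs).length (y :: ys).length = min xs.length ys.length + 1 by
        simp [List.length_cons, Nat.succ_min_succ]]
  exact mkAux_cons_gt x y xs ys hxy hys _ (le_refl _)

theorem mkAux_cons_right (x y : Int) (xs ys : List Int) :
    ∀ j : Nat, j ≤ ys.length →
      mkAux (x :: xs) (y :: ys) j = mkAux (x :: xs) ys j := by
  intro j
  induction j with
  | zero => intro _; rfl
  | succ j ih =>
    intro hj
    simp only [mkAux, pOK_cons_right x y xs ys (j + 1) hj]
    by_cases hp : pOK (x :: xs) ys (j + 1) = true
    · simp [hp]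
    · simp only [hp, Bool.false_eq_true, if_false]
      exact ih (by omega)

theorem mk_cons_le (x y : Int) (xs ys : List Int) (hxy : x ≤ y) :
    mk (x :: xs) (y :: ys) = mk (x :: xs) ys := by
  unfold mk
  by_cases hc : ys.length ≤ xs.length
  · rw [show min (x :: xs).length (y :: ys).length = ys.length + 1 by
          simp [List.length_cons]; omega,
        show min (x :: xs).length ys.length = ys.length by
          simp [List.length_cons]; omega]
    have hfalse : ¬ pOK (x :: xs) (y :: ys) (ys.length + 1) = true := by
      intro hcontra
      rw [pOK_iff] at hcontra
      have := hcontra 0 (by omega)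
      rw [show (y :: ys).length - (ys.length + 1) + 0 = 0 by simp] at this
      simp only [List.getD_cons_zero] at this
      omega
    simp only [mkAux, hfalse, Bool.false_eq_true, if_false]
    exact mkAux_cons_right x y xs ys ys.length (le_refl _)
  · rw [show min (x :: xs).length (y :: ys).length = xs.length + 1 by
          simp [List.length_cons]; omega,
        show min (x :: xs).length ys.length = xs.length + 1 by
          simp [List.length_cons]; omega]
    exact mkAux_cons_right x y xs ys (xs.length + 1) (by omega)

theorem Acount_mk (b : List Int) : ∀ (a : List Int), SD a → SD b →
    Acount a b = (mk a b : Int) := by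
  induction b with
  | nil =>
    intro a _ _
    rw [Acount_nil_right]
    simp [mk, mkAux]
  | cons y ys ih =>
    intro a ha hb
    cases a with
    | nil => simp [Acount, mk, mkAux]
    | cons x xs =>
      have hys : SD ys := (List.pairwise_cons.mp hb).2
      have hxs : SD xs := (List.pairwise_cons.mp ha).2
      by_cases hxy : y < x
      · rw [Acount, if_pos hxy, ih xs hxs hys, mk_cons_gt x y xs ys hxy hb]
        push_cast
        ring
      · rw [Acount, if_neg hxy, ih (x :: xs) ha hys,
            mk_cons_le x y xs ys (by omega)]

-- ---- B's binary search computes mkAux on the take-n prefixes ----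

theorem pOK_zero (a b : List Int) : pOK a b 0 = true := by
  simp [pOK]

theorem pOK_mono (a b : List Int) (hb : SD b) {k j : Nat} (hkj : k ≤ j) (hj : j ≤ b.length)
    (h : pOK a b j = true) : pOK a b k = true := by
  rw [pOK_iff] at h ⊢
  intro i hi
  have h1 := h i (by omega)
  have h2 : b.getD (b.length - k + i) 0 ≤ b.getD (b.length - j + i) 0 :=
    SD_getD_le b hb (by omega) (by omega)
  omega

theorem mkAux_le (a b : List Int) (m : Nat) : mkAux a b m ≤ m := by
  induction m with
  | zero => simp [mkAux]
  | succ j ih =>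
    rw [mkAux]
    split
    · exact le_refl _
    · omega

theorem pOK_mkAux (a b : List Int) (m : Nat) : pOK a b (mkAux a b m) = true := by
  induction m with
  | zero => simpa [mkAux] using pOK_zero a b
  | succ j ih =>
    rw [mkAux]
    split
    · assumption
    · exact ih

theorem mkAux_max (a b : List Int) (m : Nat) : ∀ k ≤ m, pOK a b k = true → k ≤ mkAux a b m := by
  induction m with
  | zero => intro k hk _; omega
  | succ j ih =>
    intro k hk hp
    rw [mkAux]
    split
    · exact hk
    · rename_i hfail
      have hkj : k ≤ j := by
        rcases Nat.lt_or_ge k (j + 1) with h | h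
        · omega
        · exfalso; exact hfail (by rwa [show j + 1 = k by omega])
      exact ih k hkj hp

theorem okB_eq_pOK (a b : List Int) (n k : Int) (h0 : 0 < k) (hk : k ≤ n)
    (ha : n ≤ (a.length : Int)) (hb : n ≤ (b.length : Int)) :
    okB a b n k = pOK (a.take n.toNat) (b.take n.toNat) k.toNat := by
  rw [Bool.eq_iff_iff, pOK_iff]
  unfold okB
  rw [List.all_eq_true]
  have hblen : (b.take n.toNat).length = n.toNat := by
    rw [List.length_take]
    omega
  constructor
  · intro h i hi
    have hmem : (i : Int) ∈ PySem.List.pyRange 0 k 1 := by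
      rw [PySem.List.mem_pyRange_one]
      omega
    have := h _ hmem
    rw [decide_eq_true_iff] at this
    rw [hblen,
        List.getD_eq_getElem _ 0 (by rw [hblen]; omega),
        List.getD_eq_getElem _ 0 (by rw [List.length_take]; omega),
        List.getElem_take, List.getElem_take]
    have hgb : (PySem.List.pyGet? b (n - k + (i : Int))).getD 0 = b[(n - k + (i : Int)).toNat] := by
      rw [PySem.List.pyGet?_eq_some_getElem b (by omega) (by omega)]
      rfl
    have hga : (PySem.List.pyGet? a (i : Int)).getD 0 = a[((i : Int)).toNat] := by
      rw [PySem.List.pyGet?_eq_some_getElem a (by omega) (by omega)]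
      rfl
    rw [hgb, hga] at this
    have e1 : (n - k + (i : Int)).toNat = n.toNat - k.toNat + i := by omega
    have e2 : ((i : Int)).toNat = i := by omega
    simp only [e1, e2] at this
    exact this
  · intro h i hmem
    rw [PySem.List.mem_pyRange_one] at hmem
    rw [decide_eq_true_iff]
    have hi' : i.toNat < k.toNat := by omega
    have := h i.toNat hi'
    rw [hblen,
        List.getD_eq_getElem _ 0 (by rw [hblen]; omega),
        List.getD_eq_getElem _ 0 (by rw [List.length_take]; omega),
        List.getElem_take, List.getElem_take] at this
    have hgb : (PySem.List.pyGet? b (n - k + i)).getD 0 = b[(n - k + i).toNat] := by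
      rw [PySem.List.pyGet?_eq_some_getElem b (by omega) (by omega)]
      rfl
    have hga : (PySem.List.pyGet? a i).getD 0 = a[i.toNat] := by
      rw [PySem.List.pyGet?_eq_some_getElem a (by omega) (by omega)]
      rfl
    rw [hgb, hga]
    have e1 : (n - k + i).toNat = n.toNat - k.toNat + i.toNat := by omega
    simp only [e1]
    exact this

theorem bsB_correct (a b : List Int) (n : Int) (hn : 0 ≤ n)
    (ha : n ≤ (a.length : Int)) (hb : n ≤ (b.length : Int))
    (hSDb : SD (b.take n.toNat)) :
    ∀ (f : Nat) (lo hi : Int),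
      0 ≤ lo → hi ≤ n → (hi - lo).toNat ≤ f →
      lo ≤ (mkAux (a.take n.toNat) (b.take n.toNat) n.toNat : Int) →
      (mkAux (a.take n.toNat) (b.take n.toNat) n.toNat : Int) ≤ hi →
      bsB a b n lo hi f = (mkAux (a.take n.toNat) (b.take n.toNat) n.toNat : Int) := by
  set A := a.take n.toNat with hA
  set B := b.take n.toNat with hB
  set M := mkAux A B n.toNat with hM
  have hBlen : B.length = n.toNat := by rw [hB, List.length_take]; omega
  have hMle : M ≤ n.toNat := mkAux_le A B n.toNat
  intro f
  induction f with
  | zero =>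
    intro lo hi h0 hhi hf hloM hMhi
    have : hi ≤ lo := by omega
    rw [bsB]
    omega
  | succ f ih =>
    intro lo hi h0 hhi hf hloM hMhi
    rw [bsB]
    by_cases hlh : lo < hi
    · rw [if_pos hlh]
      have hmid : PySem.Int.floordiv (lo + hi + 1) 2 = (lo + hi + 1) / 2 :=
        PySem.Int.floordiv_eq_ediv_of_pos (by omega)
      show (if okB a b n (PySem.Int.floordiv (lo + hi + 1) 2) = true
              then bsB a b n (PySem.Int.floordiv (lo + hi + 1) 2) hi f
              else bsB a b n lo (PySem.Int.floordiv (lo + hi + 1) 2 - 1) f) = (M : Int)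
      generalize hmd : PySem.Int.floordiv (lo + hi + 1) 2 = mid
      rw [hmd] at hmid
      have hmid1 : lo < mid := by omega
      have hmid2 : mid ≤ hi := by omega
      have hok : okB a b n mid = pOK A B mid.toNat :=
        okB_eq_pOK a b n mid (by omega) (by omega) ha hb
      by_cases hp : pOK A B mid.toNat = true
      · rw [hok, hp]
        simp only [if_true]
        have hmidM : mid ≤ (M : Int) := by
          have := mkAux_max A B n.toNat mid.toNat (by omega) hp
          omega
        exact ih mid hi (by omega) hhi (by omega) hmidM hMhi
      · rw [hok]
        simp only [hp, Bool.false_eq_true, if_false]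
        have hMmid : (M : Int) < mid := by
          by_contra hcon
          push Not at hcon
          exact hp (pOK_mono A B hSDb (by omega) (by omega) (pOK_mkAux A B n.toNat))
        exact ih lo (mid - 1) h0 (by omega) (by omega) hloM (by omega)
    · rw [if_neg hlh]
      omega

-- ---- assembling the two sides ----

theorem SD_take_sorted (l : List Int) (m : Nat) :
    SD ((PySem.List.sorted l (fun x => x) true).take m) := by
  have h := PySem.List.sorted_pairwise_rev l (fun x => x)
  exact h.sublist (List.take_sublist m _)

theorem solve_eq_Acount (myTeam opponent : List Int) (n : Int) (hn : 0 ≤ n)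
    (h1 : n ≤ (myTeam.length : Int)) (h2 : n ≤ (opponent.length : Int)) :
    solve myTeam opponent n =
      Acount ((PySem.List.sorted myTeam (fun x => x) true).take n.toNat)
             ((PySem.List.sorted opponent (fun x => x) true).take n.toNat) := by
  unfold solve
  rw [outerA_spec n.toNat _ _ n 0 0 0 (le_refl _) (le_refl _) (by omega)
        (by rw [PySem.List.length_sorted]; omega)
        (by rw [PySem.List.length_sorted]; omega) hn]
  simp

theorem solve_alt_eq_mk (myTeam opponent : List Int) (n : Int) (hn : 0 ≤ n)
    (h1 : n ≤ (myTeam.length : Int)) (h2 : n ≤ (opponent.length : Int)) :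
    solve_alt myTeam opponent n =
      (mkAux ((PySem.List.sorted myTeam (fun x => x) true).take n.toNat)
             ((PySem.List.sorted opponent (fun x => x) true).take n.toNat) n.toNat : Int) := by
  unfold solve_alt
  have ha : n ≤ ((PySem.List.sorted myTeam (fun x => x) true).length : Int) := by
    rw [PySem.List.length_sorted]; omega
  have hb : n ≤ ((PySem.List.sorted opponent (fun x => x) true).length : Int) := by
    rw [PySem.List.length_sorted]; omega
  have hMle := mkAux_le ((PySem.List.sorted myTeam (fun x => x) true).take n.toNat)
    ((PySem.List.sorted opponent (fun x => x) true).take n.toNat) n.toNat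
  exact bsB_correct _ _ n hn ha hb (SD_take_sorted opponent n.toNat) n.toNat 0 n
    (le_refl 0) (le_refl n) (by omega) (by positivity) (by omega)

-- ===== VERDICT (by name: the statement is the Claim_ definition above) =====
theorem solve_spec : Claim_equal_solve := by
  intro myTeam opponent n _ hpre
  obtain ⟨h1, h2⟩ := hpre
  unfold Spec_solve
  by_cases hn : 0 ≤ n
  · rw [solve_eq_Acount myTeam opponent n hn h1 h2,
        solve_alt_eq_mk myTeam opponent n hn h1 h2,
        Acount_mk _ _ (SD_take_sorted _ _) (SD_take_sorted _ _)]
    unfold mk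
    congr 2
    simp [List.length_take, PySem.List.length_sorted]
    omega
  · have hA : solve myTeam opponent n = 0 := by
      unfold solve
      rw [show n.toNat = 0 by omega]
      rfl
    have hB : solve_alt myTeam opponent n = 0 := by
      unfold solve_alt
      rw [show n.toNat = 0 by omega]
      rfl
    rw [hA, hB]
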